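-- pv_equiv track=rewrite | github.com/C-Alexis4414/Suite-de-Conway | app.py | decoupeChaine
-- ===== SOURCE A (Python) =====
-- def decoupeChaine(chaine):
--     chaineSeparee = chaine[0]
--     for i in range(1, len(chaine)):
--         if chaine[i] != chaine[i-1]:
--             chaineSeparee += " " + chaine[i]
--         else:
--             chaineSeparee += chaine[i]
--     return chaineSeparee
-- ===== SOURCE B (Python) =====
-- def decoupeChaine(chaine):
--     # Split into maximal runs of equal characters, then join the runs with spaces.
--     runs = []
--     i = 0
--     n = len(chaine)
--     while i < n:
--         j = i + 1
--         while j < n and chaine[j] == chaine[i]: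
--             j += 1
--         runs.append(chaine[i:j])
--         i = j
--     return runs[0] + "".join(" " + r for r in runs[1:])
-- ===== Notes on version B (the rewrite author's own statement) =====
-- stated objective: alternative
-- what changed: B first splits the string into maximal runs of equal characters with a two-pointer scan and then joins the runs with spaces, instead of A's single index loop that compares each character with its predecessor and appends a space inline.
import Mathlib
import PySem

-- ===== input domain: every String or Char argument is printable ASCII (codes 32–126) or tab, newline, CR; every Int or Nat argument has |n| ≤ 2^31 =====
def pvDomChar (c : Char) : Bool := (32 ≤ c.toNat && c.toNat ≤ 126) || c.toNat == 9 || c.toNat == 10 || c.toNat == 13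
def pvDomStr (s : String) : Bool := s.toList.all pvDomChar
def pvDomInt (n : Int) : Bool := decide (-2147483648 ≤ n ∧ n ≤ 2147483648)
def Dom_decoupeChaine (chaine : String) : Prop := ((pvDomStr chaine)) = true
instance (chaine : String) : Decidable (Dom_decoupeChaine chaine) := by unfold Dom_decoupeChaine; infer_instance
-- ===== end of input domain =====

-- B splits the string into maximal runs of equal characters and joins them with spaces;
-- alternative decomposition, same asymptotic cost; both raise on "" (excluded by Pre_).

-- ===== PORT A =====
-- A: chaineSeparee = chaine[0]; for i in range(1, len): compare chaine[i] with chaine[i-1].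
def decoupeChaine (chaine : String) : String :=
  let cs := chaine.toList
  let init := cs.take 1  -- chaine[0]; "" raises IndexError in Python (excluded by Pre_)
  String.mk ((PySem.List.pyRange 1 (cs.length : Int) 1).foldl
    (fun acc i =>
      if PySem.List.pyGetD cs i ' ' ≠ PySem.List.pyGetD cs (i - 1) ' ' then
        acc ++ [' ', PySem.List.pyGetD cs i ' ']
      else
        acc ++ [PySem.List.pyGetD cs i ' ']) init)

-- ===== PORT B =====
-- B's two-pointer run extraction: the inner while 'chaine[j] == chaine[i]' is the
-- takeWhile of the run's first character; restarting at j is the matching dropWhile.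
def pyRuns : List Char → List (List Char)
  | [] => []
  | c :: rest =>
    (c :: rest.takeWhile (· == c)) :: pyRuns (rest.dropWhile (· == c))
termination_by cs => cs.length
decreasing_by
  exact Nat.lt_succ_of_le (List.length_dropWhile_le _ _)

-- runs[0] + "".join(" " + r for r in runs[1:]); runs[0] raises on "" (excluded by Pre_)
def decoupeChaine_alt (chaine : String) : String :=
  match pyRuns chaine.toList with
  | [] => ""
  | r :: rs => String.mk (r ++ rs.flatMap (fun g => ' ' :: g))

-- ===== PRECONDITION & SPEC =====
-- Pre_ excludes only the empty string, on which A (chaine[0]) raises IndexError.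
def Pre_decoupeChaine (chaine : String) : Prop := chaine ≠ ""
instance (chaine : String) : Decidable (Pre_decoupeChaine chaine) := by
  unfold Pre_decoupeChaine; infer_instance
def pvWitness_decoupeChaine : String := "1211"

def Spec_decoupeChaine (chaine : String) (out : String) : Prop := out = decoupeChaine_alt chaine
instance (chaine : String) (out : String) : Decidable (Spec_decoupeChaine chaine out) := by
  unfold Spec_decoupeChaine; infer_instance

-- ===== CLAIM (what is proved, stated in full; the proofs are below) =====
def Claim_equal_decoupeChaine : Prop := ∀ (chaine : String), Dom_decoupeChaine chaine → Pre_decoupeChaine chaine → Spec_decoupeChaine chaine (decoupeChaine chaine)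

-- ===== LEMMAS AND PROOFS =====

-- Common reference form: for each character, a space plus it if it differs from its
-- predecessor, else just it.
def seqFrom (p : Char) : List Char → List Char
  | [] => []
  | c :: rest => (if c ≠ p then [' ', c] else [c]) ++ seqFrom c rest

lemma seqFrom_take_drop (p : Char) (rest : List Char) :
    seqFrom p rest =
      rest.takeWhile (· == p) ++
        (match rest.dropWhile (· == p) with
         | [] => []
         | y :: d' => ' ' :: y :: seqFrom y d') := by
  induction rest generalizing p with
  | nil => simp [seqFrom]
  | cons c r' ih =>
    by_cases h : c = p
    · subst h
      simp [seqFrom, List.takeWhile, List.dropWhile, ih c]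
    · have hb : (c == p) = false := by simp [h]
      simp [seqFrom, List.takeWhile, List.dropWhile, hb, h]

lemma joinB_pyRuns (x : Char) (rest : List Char) :
    (match pyRuns (x :: rest) with
     | [] => ([] : List Char)
     | r :: rs => r ++ rs.flatMap (fun g => ' ' :: g)) = x :: seqFrom x rest := by
  induction hn : rest.length using Nat.strong_induction_on generalizing x rest with
  | _ n ih =>
    rw [pyRuns]
    rcases hd : rest.dropWhile (· == x) with _ | ⟨y, d'⟩
    · have : rest.takeWhile (· == x) = rest := by
        have := List.takeWhile_append_dropWhile (p := (· == x)) (l := rest)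
        simpa [hd] using this
      simp only [pyRuns]
      simp [seqFrom_take_drop, hd, this]
    · have hlt : d'.length < n := by
        subst hn
        have h1 := List.length_dropWhile_le (· == x) rest
        rw [hd] at h1
        simpa using Nat.lt_of_lt_of_le (Nat.lt_succ_self _) h1
      have := ih d'.length hlt y d' rfl
      rw [pyRuns] at this ⊢
      rcases hr : pyRuns (d'.dropWhile (· == y)) with _ | ⟨r, rs⟩ <;>
        · rw [hr] at this
          simp only [List.flatMap_cons, List.flatMap_nil] at this ⊢
          rw [seqFrom_take_drop x rest, hd]
          simp
          try simp at this
          try rw [← this]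
          try simp

lemma loopA (cs : List Char) (k : Nat) (acc : List Char) (hk : k < cs.length) :
    (PySem.List.pyRange ((k : Int) + 1) (cs.length : Int) 1).foldl
      (fun acc i =>
        if PySem.List.pyGetD cs i ' ' ≠ PySem.List.pyGetD cs (i - 1) ' ' then
          acc ++ [' ', PySem.List.pyGetD cs i ' ']
        else
          acc ++ [PySem.List.pyGetD cs i ' ']) acc
    = acc ++ seqFrom (cs[k]'hk) (cs.drop (k + 1)) := by
  induction hn : cs.length - (k + 1) generalizing k acc with
  | zero =>
    have hle : cs.length ≤ k + 1 := by omega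
    rw [PySem.List.pyRange_one_eq_nil (by exact_mod_cast hle)]
    have : cs.drop (k + 1) = [] := List.drop_eq_nil_of_le hle
    simp [this, seqFrom]
  | succ m ih =>
    have hk1 : k + 1 < cs.length := by omega
    rw [PySem.List.pyRange_one_cons (by exact_mod_cast hk1)]
    have hget : PySem.List.pyGetD cs ((k : Int) + 1) ' ' = cs[k + 1]'hk1 := by
      rw [show ((k : Int) + 1) = ((k + 1 : Nat) : Int) by push_cast; ring]
      rw [PySem.List.pyGetD_natCast]
      exact List.getD_eq_getElem cs ' ' hk1
    have hget' : PySem.List.pyGetD cs ((k : Int) + 1 - 1) ' ' = cs[k]'hk := by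
      rw [show ((k : Int) + 1 - 1) = ((k : Nat) : Int) by ring]
      rw [PySem.List.pyGetD_natCast]
      exact List.getD_eq_getElem cs ' ' hk
    have hdrop : cs.drop (k + 1) = cs[k + 1]'hk1 :: cs.drop (k + 2) := by
      rw [List.drop_eq_getElem_cons hk1]
    have hrec := ih (k + 1)
      (if PySem.List.pyGetD cs ((k : Int) + 1) ' ' ≠ PySem.List.pyGetD cs ((k : Int) + 1 - 1) ' '
        then acc ++ [' ', PySem.List.pyGetD cs ((k : Int) + 1) ' ']
        else acc ++ [PySem.List.pyGetD cs ((k : Int) + 1) ' ']) hk1 (by omega)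
    simp only [List.foldl_cons]
    rw [show (((k + 1 : Nat) : Int) + 1) = ((k : Int) + 1 + 1) by push_cast; ring] at hrec
    rw [hrec, hdrop]
    rw [seqFrom]
    rw [hget, hget']
    by_cases h : cs[k + 1]'hk1 = cs[k]'hk <;> simp [h, List.append_assoc]

-- ===== VERDICT (by name: the statement is the Claim_ definition above) =====
theorem decoupeChaine_spec : Claim_equal_decoupeChaine := by
  intro chaine _ hpre
  unfold Spec_decoupeChaine decoupeChaine decoupeChaine_alt
  rcases hc : chaine.toList with _ | ⟨x, rest⟩
  · exact absurd (String.toList_eq_nil_iff.mp hc) hpre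
  · have hA := loopA (x :: rest) 0 [x] (by simp)
    have hB := joinB_pyRuns x rest
    rcases hr : pyRuns (x :: rest) with _ | ⟨r, rs⟩
    · rw [pyRuns] at hr; simp at hr
    · rw [hr] at hB
      simp at hA
      simp [hA]
      simp at hB
      simp [hB]
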